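-- pv_equiv track=rewrite | github.com/jeffhussmann/hits | code/Sequencing/sam.py | merge_ref_dicts
-- ===== SOURCE A (Python) =====
-- def merge_ref_dicts(first_dict, second_dict):
--     ''' Merge dictionaries mapping reference positions to base identities. '''
--     merged_dict = {}
--     merged_dict.update(first_dict)
--     for position, base in second_dict.items():
--         if position in merged_dict:
--             if merged_dict[position] != base:
--                 # contradiction
--                 raise ValueError(first_dict, second_dict)
--         else:
--             merged_dict[position] = base
--
--     return merged_dict
-- ===== SOURCE B (Python) =====
-- def merge_ref_dicts(first_dict, second_dict):
--     ''' Merge dictionaries mapping reference positions to base identities. '''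
--     pairs = set(first_dict.items()) | set(second_dict.items())
--     if len(pairs) != len({position for position, _ in pairs}):
--         # some position carries two distinct bases: contradiction
--         raise ValueError(first_dict, second_dict)
--     return {**first_dict, **second_dict}
-- ===== Notes on version B (the rewrite author's own statement) =====
-- stated objective: alternative
-- what changed: B detects contradictions by a cardinality argument -- it unions the two item-sets and raises iff the number of distinct (position, base) pairs exceeds the number of distinct positions -- and then builds the result in one step with {**first_dict, **second_dict} unpacking, instead of A's interleaved per-key compare-and-insert loop.
import Mathlib
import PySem

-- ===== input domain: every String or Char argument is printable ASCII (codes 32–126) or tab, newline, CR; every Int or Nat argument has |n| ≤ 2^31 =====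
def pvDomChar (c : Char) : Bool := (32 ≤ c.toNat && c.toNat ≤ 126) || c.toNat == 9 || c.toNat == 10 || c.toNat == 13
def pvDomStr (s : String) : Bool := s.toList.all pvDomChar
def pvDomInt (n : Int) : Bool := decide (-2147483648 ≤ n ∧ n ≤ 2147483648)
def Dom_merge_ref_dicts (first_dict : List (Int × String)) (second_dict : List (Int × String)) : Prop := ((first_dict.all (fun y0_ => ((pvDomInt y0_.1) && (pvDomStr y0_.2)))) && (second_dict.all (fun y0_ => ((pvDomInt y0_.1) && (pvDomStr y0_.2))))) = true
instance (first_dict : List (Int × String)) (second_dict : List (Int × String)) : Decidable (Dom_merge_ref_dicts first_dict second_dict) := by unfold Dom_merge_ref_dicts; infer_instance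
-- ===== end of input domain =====

-- B detects contradictions by a different mechanism (cardinality of the unioned item-set vs its distinct positions) and then merges by dict unpacking, instead of A's interleaved per-key compare-and-insert loop (objective: alternative).


-- ===== PORT A =====
def merge_ref_dicts (first_dict : List (Int × String)) (second_dict : List (Int × String)) : List (Int × String) :=
  -- merged_dict = {}; merged_dict.update(first_dict)
  let merged := PySem.Dict.update (PySem.Dict.empty) first_dict
  -- for position, base in second_dict.items(): …
  let merged := (PySem.Dict.ofList second_dict).items.foldl
    (fun d pb =>
      if d.contains pb.1 then
        d  -- if merged_dict[position] != base: Python raises ValueError (those inputs are excluded by Pre_)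
      else d.insert pb.1 pb.2) merged
  merged.items

-- ===== PORT B =====
def merge_ref_dicts_alt (first_dict : List (Int × String)) (second_dict : List (Int × String)) : List (Int × String) :=
  -- pairs = set(first_dict.items()) | set(second_dict.items())
  let pairs : PySem.Set (Int × String) :=
    PySem.Set.union (PySem.Set.ofList (PySem.Dict.ofList first_dict).items)
                    ((PySem.Dict.ofList second_dict).items)
  -- {position for position, _ in pairs}  (consumed only through len, which is order-independent)
  let positions : PySem.Set Int := PySem.Set.ofList (pairs.map Prod.fst)
  if PySem.Set.len pairs ≠ PySem.Set.len positions then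
    []  -- Python raises ValueError here (those inputs are excluded by Pre_)
  else
    -- {**first_dict, **second_dict}
    ((PySem.Dict.ofList first_dict).update (PySem.Dict.ofList second_dict).items).items

-- ===== PRECONDITION & SPEC =====
-- Pre_ excludes exactly the contradictory inputs (some position mapped to different bases by the
-- two dicts), on which the Python A raises ValueError (B raises there too).
def Pre_merge_ref_dicts (first_dict : List (Int × String)) (second_dict : List (Int × String)) : Prop :=
  ∀ p ∈ (PySem.Dict.ofList first_dict).items, ∀ q ∈ (PySem.Dict.ofList second_dict).items,
    p.1 = q.1 → p.2 = q.2
instance (first_dict : List (Int × String)) (second_dict : List (Int × String)) : Decidable (Pre_merge_ref_dicts first_dict second_dict) := by unfold Pre_merge_ref_dicts; infer_instance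

def pvWitness_merge_ref_dicts : (List (Int × String)) × (List (Int × String)) :=
  ([(1, "A"), (3, "C")], [(1, "A"), (2, "G")])

def Spec_merge_ref_dicts (first_dict : List (Int × String)) (second_dict : List (Int × String)) (out : List (Int × String)) : Prop := out = merge_ref_dicts_alt first_dict second_dict
instance (first_dict : List (Int × String)) (second_dict : List (Int × String)) (out : List (Int × String)) : Decidable (Spec_merge_ref_dicts first_dict second_dict out) := by unfold Spec_merge_ref_dicts; infer_instance

-- ===== CLAIM (what is proved, stated in full; the proofs are below) =====
def Claim_equal_merge_ref_dicts : Prop := ∀ (first_dict : List (Int × String)) (second_dict : List (Int × String)), Dom_merge_ref_dicts first_dict second_dict → Pre_merge_ref_dicts first_dict second_dict → Spec_merge_ref_dicts first_dict second_dict (merge_ref_dicts first_dict second_dict)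

-- ===== LEMMAS AND PROOFS =====

-- Inserting the value a key already has leaves the dict unchanged.
lemma insert_self_of_get? (d : PySem.Dict Int String) {k : Int} {v : String}
    (hnd : d.keys.Nodup) (h : d.get? k = some v) : d.insert k v = d := by
  apply PySem.Dict.ext
  have hc : d.contains k = true := by
    rw [PySem.Dict.contains_eq_isSome_get?, h]; rfl
  rw [PySem.Dict.items_insert_of_contains d v hc]
  conv_rhs => rw [← List.map_id d.items]
  apply List.map_congr_left
  intro p hp
  by_cases hk : (p.1 == k) = true
  · have hk' : p.1 = k := by simpa using hk
    have : d.get? p.1 = some p.2 := PySem.Dict.get?_of_mem_items d hp hnd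
    rw [hk'] at this
    rw [h] at this
    have hv : v = p.2 := by simpa using this
    simp [← hk', hv]
  · simp [hk]

-- A's check-and-insert loop coincides with a plain insert loop when every pair of the
-- (nodup-keyed) list is compatible with the accumulator.
lemma foldl_check_eq_foldl_insert (l : List (Int × String)) (d : PySem.Dict Int String)
    (hnd : d.keys.Nodup) (hl : (l.map (·.1)).Nodup)
    (hcomp : ∀ p ∈ l, d.get? p.1 = none ∨ d.get? p.1 = some p.2) :
    l.foldl (fun d pb => if d.contains pb.1 then d else d.insert pb.1 pb.2) d
      = l.foldl (fun d pb => d.insert pb.1 pb.2) d := by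
  induction l generalizing d with
  | nil => rfl
  | cons hd tl ih =>
    simp only [List.foldl_cons]
    have hhd := hcomp hd (by simp)
    rcases hhd with hnone | hsome
    · have hcon : d.contains hd.1 = false := by
        rw [PySem.Dict.contains_eq_isSome_get?, hnone]; rfl
      rw [if_neg (by simp [hcon])]
      apply ih
      · exact PySem.Dict.nodup_keys_insert d hd.1 hd.2 hnd
      · exact (List.nodup_cons.mp (by rw [List.map_cons] at hl; exact hl)).2
      · intro p hp
        have hne : p.1 ≠ hd.1 := by
          have := (List.nodup_cons.mp (by rw [List.map_cons] at hl; exact hl)).1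
          intro he
          exact this (he ▸ (List.mem_map.mpr ⟨p, hp, rfl⟩))
        rw [PySem.Dict.get?_insert_of_ne d hd.2 hne]
        exact hcomp p (by simp [hp])
    · have hc : d.contains hd.1 = true := by
        rw [PySem.Dict.contains_eq_isSome_get?, hsome]; rfl
      rw [if_pos (by simp [hc]), insert_self_of_get? d hnd hsome]
      apply ih d hnd (List.nodup_cons.mp (by rw [List.map_cons] at hl; exact hl)).2
      exact fun p hp => hcomp p (by simp [hp])

-- Under Pre_, distinct pairs of the unioned item-set have distinct positions, so B's
-- cardinality test succeeds: |pairs| = |{positions}|.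
lemma len_pairs_eq_len_positions (first_dict second_dict : List (Int × String))
    (hpre : Pre_merge_ref_dicts first_dict second_dict) :
    PySem.Set.len (PySem.Set.union (PySem.Set.ofList (PySem.Dict.ofList first_dict).items)
                    ((PySem.Dict.ofList second_dict).items))
      = PySem.Set.len (PySem.Set.ofList
          ((PySem.Set.union (PySem.Set.ofList (PySem.Dict.ofList first_dict).items)
              ((PySem.Dict.ofList second_dict).items)).map Prod.fst)) := by
  set fd := PySem.Dict.ofList first_dict with hfd
  set sd := PySem.Dict.ofList second_dict with hsd
  set pairs := PySem.Set.union (PySem.Set.ofList fd.items) sd.items with hpairs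
  have hmem : ∀ p ∈ pairs, p ∈ fd.items ∨ p ∈ sd.items := by
    intro p hp
    rw [hpairs, PySem.Set.mem_union] at hp
    rcases hp with h | h
    · rw [← PySem.List.dedup_eq_ofList] at h
      exact Or.inl ((PySem.List.mem_dedup _ _).mp h)
    · exact Or.inr h
  have hnodup : pairs.Nodup :=
    PySem.Set.nodup_union _ _ (PySem.Set.nodup_ofList _)
  have hinj : ∀ p ∈ pairs, ∀ q ∈ pairs, p.1 = q.1 → p = q := by
    intro p hp q hq hk
    have hfnd : fd.keys.Nodup := PySem.Dict.nodup_keys_ofList first_dict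
    have hsnd : sd.keys.Nodup := PySem.Dict.nodup_keys_ofList second_dict
    have hv : p.2 = q.2 := by
      rcases hmem p hp with hpf | hps <;> rcases hmem q hq with hqf | hqs
      · have h1 := PySem.Dict.get?_of_mem_items fd hpf hfnd
        have h2 := PySem.Dict.get?_of_mem_items fd hqf hfnd
        rw [hk] at h1; rw [h2] at h1; simpa using h1.symm
      · exact hpre p hpf q hqs hk
      · exact (hpre q hqf p hps hk.symm).symm
      · have h1 := PySem.Dict.get?_of_mem_items sd hps hsnd
        have h2 := PySem.Dict.get?_of_mem_items sd hqs hsnd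
        rw [hk] at h1; rw [h2] at h1; simpa using h1.symm
    exact Prod.ext hk hv
  have hmapnd : (pairs.map Prod.fst).Nodup :=
    hnodup.map_on (fun p hp q hq h => hinj q hq p hp h.symm |>.symm)
  rw [PySem.Set.ofList_eq_self_of_nodup _ hmapnd]
  simp [PySem.Set.len]

-- ===== VERDICT (by name: the statement is the Claim_ definition above) =====
theorem merge_ref_dicts_spec : Claim_equal_merge_ref_dicts := by
  intro first_dict second_dict _ hpre
  unfold Spec_merge_ref_dicts merge_ref_dicts merge_ref_dicts_alt
  set fd := PySem.Dict.ofList first_dict with hfd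
  set sd := PySem.Dict.ofList second_dict with hsd
  have hfdn : fd.keys.Nodup := PySem.Dict.nodup_keys_ofList first_dict
  have hcomp : ∀ p ∈ sd.items, fd.get? p.1 = none ∨ fd.get? p.1 = some p.2 := by
    intro p hp
    cases hg : fd.get? p.1 with
    | none => exact Or.inl rfl
    | some w =>
      right
      have hw : (p.1, w) ∈ fd.items := PySem.Dict.mem_items_of_get?_eq_some fd hg
      have := hpre (p.1, w) hw p hp rfl
      rw [← this]
  have hlen := len_pairs_eq_len_positions first_dict second_dict hpre
  rw [← hfd, ← hsd] at hlen
  simp only [hlen, ne_eq, not_true_eq_false, if_false]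
  have hstart : PySem.Dict.update (PySem.Dict.empty) first_dict = fd := rfl
  rw [hstart]
  have hupd : fd.update sd.items = sd.items.foldl (fun d pb => d.insert pb.1 pb.2) fd := rfl
  rw [hupd]
  have hkeys : (sd.items.map (·.1)).Nodup := PySem.Dict.nodup_keys_ofList second_dict
  rw [foldl_check_eq_foldl_insert sd.items fd hfdn hkeys hcomp]
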